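-- pv_equiv track=rewrite | github.com/PLucasMendonca/Faculdade | 8_semestre/IA2/2122130042.py | exercicio_6
-- ===== SOURCE A (Python) =====
-- def exercicio_6(str1, str2):
--     m, n = len(str1), len(str2)
--
--     # Matriz para DP
--     dp = [[0 for _ in range(n + 1)] for _ in range(m + 1)]
--
--     # Inicialização - custo para transformar em string vazia
--     for i in range(m + 1):
--         dp[i][0] = i
--     for j in range(n + 1):
--         dp[0][j] = j
--
--     # Preenchendo a matriz
--     for i in range(1, m + 1):
--         for j in range(1, n + 1):
--             if str1[i-1] == str2[j-1]:
--                 dp[i][j] = dp[i-1][j-1]  # Sem custo se caracteres iguais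
--             else:
--                 # Mínimo entre remoção, inserção e substituição
--                 dp[i][j] = 1 + min(dp[i-1][j], dp[i][j-1], dp[i-1][j-1])
--
--     # Reconstruindo as operações
--     operations = []
--     i, j = m, n
--
--     while i > 0 or j > 0:
--         if i > 0 and j > 0 and str1[i-1] == str2[j-1]:
--             # Caracteres iguais
--             i -= 1
--             j -= 1
--         elif i > 0 and j > 0 and dp[i][j] == dp[i-1][j-1] + 1:
--             # Substituição
--             operations.append(f"Substituir '{str1[i-1]}' por '{str2[j-1]}'")
--             i -= 1
--             j -= 1
--         elif i > 0 and dp[i][j] == dp[i-1][j] + 1: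
--             # Remoção
--             operations.append(f"Remover '{str1[i-1]}'")
--             i -= 1
--         elif j > 0 and dp[i][j] == dp[i][j-1] + 1:
--             # Inserção
--             operations.append(f"Inserir '{str2[j-1]}'")
--             j -= 1
--
--     operations.reverse()
--     return dp[m][n], operations
-- ===== SOURCE B (Python) =====
-- def exercicio_6(str1, str2):
--     m, n = len(str1), len(str2)
--     # Each cell of the current row carries (cost, full list of operations in forward
--     # order); the answer is read directly from the last cell -- no backtracking pass.
--     row = [(0, [])]
--     for j in range(1, n + 1):
--         row.append((j, row[j - 1][1] + [f"Inserir '{str2[j-1]}'"]))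
--     for i in range(1, m + 1):
--         c1 = str1[i - 1]
--         new = [(i, row[0][1] + [f"Remover '{c1}'"])]
--         for j in range(1, n + 1):
--             if c1 == str2[j - 1]:
--                 new.append(row[j - 1])
--             else:
--                 d, u, l = row[j - 1], row[j], new[j - 1]
--                 if d[0] <= u[0] and d[0] <= l[0]:
--                     new.append((d[0] + 1, d[1] + [f"Substituir '{c1}' por '{str2[j-1]}'"]))
--                 elif u[0] <= l[0]:
--                     new.append((u[0] + 1, u[1] + [f"Remover '{c1}'"]))
--                 else:
--                     new.append((l[0] + 1, l[1] + [f"Inserir '{str2[j-1]}'"]))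
--         row = new
--     return row[n]
-- ===== Notes on version B (the rewrite author's own statement) =====
-- stated objective: alternative
-- what changed: B stores in every DP cell the pair (cost, operation list built in forward order) and reads the answer straight from the last cell, eliminating A's separate backtracking pass over the table and the final reverse.
import Mathlib
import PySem

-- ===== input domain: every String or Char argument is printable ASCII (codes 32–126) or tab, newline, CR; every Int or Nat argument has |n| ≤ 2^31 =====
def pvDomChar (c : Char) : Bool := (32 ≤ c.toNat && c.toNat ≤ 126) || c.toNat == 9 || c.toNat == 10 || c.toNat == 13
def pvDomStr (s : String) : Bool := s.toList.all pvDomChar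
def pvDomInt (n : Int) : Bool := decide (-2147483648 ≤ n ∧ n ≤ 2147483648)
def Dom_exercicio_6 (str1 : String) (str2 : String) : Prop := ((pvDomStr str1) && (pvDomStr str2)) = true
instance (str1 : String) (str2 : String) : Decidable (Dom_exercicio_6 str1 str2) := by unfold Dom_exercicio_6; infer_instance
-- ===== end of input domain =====

-- B stores in every DP cell the pair (cost, operation list in forward order), so the
-- answer is read straight from the last cell with no backtracking pass and no reverse;
-- same results (objective: alternative).

-- ===== PORT A =====
-- A's f-strings (exact: single chars concatenated into the literal text)
def fmtSubA (c1 c2 : Char) : String :=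
  "Substituir '" ++ String.singleton c1 ++ "' por '" ++ String.singleton c2 ++ "'"
def fmtRemA (c : Char) : String := "Remover '" ++ String.singleton c ++ "'"
def fmtInsA (c : Char) : String := "Inserir '" ++ String.singleton c ++ "'"

-- dp[i][j] read / write on the list of lists; all accesses A makes are with in-range
-- nonnegative indices, where these are exact
def dpGet (dp : List (List Int)) (i j : Nat) : Int := (dp.getD i []).getD j 0
def dpSet (dp : List (List Int)) (i j : Nat) (v : Int) : List (List Int) :=
  dp.set i ((dp.getD i []).set j v)

-- the body of A's inner 'for j in range(1, n + 1)' loop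
def innerA (s1 s2 : List Char) (i : Nat) (dp : List (List Int)) (j : Nat) : List (List Int) :=
  if s1.getD (i-1) ' ' = s2.getD (j-1) ' ' then
    dpSet dp i j (dpGet dp (i-1) (j-1))
  else
    dpSet dp i j
      (1 + min (dpGet dp (i-1) j) (min (dpGet dp i (j-1)) (dpGet dp (i-1) (j-1))))

-- the body of A's outer 'for i in range(1, m + 1)' loop
def rowA (s1 s2 : List Char) (dp : List (List Int)) (i : Nat) : List (List Int) :=
  (List.range' 1 s2.length).foldl (innerA s1 s2 i) dp

-- A's 'while i > 0 or j > 0' reconstruction loop; the fuel argument only makes the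
-- loop a total function (each taken branch decreases i + j, so m + n fuel is enough)
def backtrackA (s1 s2 : List Char) (dp : List (List Int)) :
    Nat → Nat → Nat → List String → List String
  | 0, _, _, acc => acc
  | fuel+1, i, j, acc =>
    if i > 0 ∨ j > 0 then
      if i > 0 ∧ j > 0 ∧ s1.getD (i-1) ' ' = s2.getD (j-1) ' ' then
        backtrackA s1 s2 dp fuel (i-1) (j-1) acc
      else if i > 0 ∧ j > 0 ∧ dpGet dp i j = dpGet dp (i-1) (j-1) + 1 then
        backtrackA s1 s2 dp fuel (i-1) (j-1)
          (acc ++ [fmtSubA (s1.getD (i-1) ' ') (s2.getD (j-1) ' ')])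
      else if i > 0 ∧ dpGet dp i j = dpGet dp (i-1) j + 1 then
        backtrackA s1 s2 dp fuel (i-1) j (acc ++ [fmtRemA (s1.getD (i-1) ' ')])
      else if j > 0 ∧ dpGet dp i j = dpGet dp i (j-1) + 1 then
        backtrackA s1 s2 dp fuel i (j-1) (acc ++ [fmtInsA (s2.getD (j-1) ' ')])
      else acc  -- Python would spin here; unreachable on the table A builds
    else acc

def exercicio_6 (str1 : String) (str2 : String) : Int × List String :=
  let s1 := str1.toList
  let s2 := str2.toList
  let m := s1.length
  let n := s2.length
  -- dp = [[0 for _ in range(n+1)] for _ in range(m+1)]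
  let dp0 : List (List Int) :=
    (List.range (m+1)).map (fun _ => (List.range (n+1)).map (fun _ => (0 : Int)))
  -- for i in range(m+1): dp[i][0] = i
  let dp1 := (List.range (m+1)).foldl (fun dp i => dpSet dp i 0 (i : Int)) dp0
  -- for j in range(n+1): dp[0][j] = j
  let dp2 := (List.range (n+1)).foldl (fun dp j => dpSet dp 0 j (j : Int)) dp1
  -- nested fill over range(1, m+1) x range(1, n+1)
  let dp3 := (List.range' 1 m).foldl (rowA s1 s2) dp2
  let ops := backtrackA s1 s2 dp3 (m+n) m n []
  (dpGet dp3 m n, ops.reverse)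

-- ===== PORT B =====
def fmtSubB (c1 c2 : Char) : String :=
  "Substituir '" ++ String.singleton c1 ++ "' por '" ++ String.singleton c2 ++ "'"
def fmtRemB (c : Char) : String := "Remover '" ++ String.singleton c ++ "'"
def fmtInsB (c : Char) : String := "Inserir '" ++ String.singleton c ++ "'"

-- Source B's row-0 loop: cell j is (j, the j insertions so far)
def row0B (s2 : List Char) : List (Int × List String) :=
  (List.range' 1 s2.length).foldl
    (fun r (j : Nat) => r ++ [((j : Int), (r.getD (j-1) (0, [])).2 ++ [fmtInsB (s2.getD (j-1) ' ')])])
    [(0, [])]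

-- the body of Source B's inner 'for j in range(1, n + 1)' loop: extend the new row by one
-- (cost, forward operation list) cell
def stepB (s2 : List Char) (c1 : Char) (prev : List (Int × List String))
    (cur : List (Int × List String)) (j : Nat) : List (Int × List String) :=
  if c1 = s2.getD (j-1) ' ' then
    cur ++ [prev.getD (j-1) (0, [])]
  else
    let d := prev.getD (j-1) (0, [])
    let u := prev.getD j (0, [])
    let l := cur.getD (j-1) (0, [])
    if d.1 ≤ u.1 ∧ d.1 ≤ l.1 then
      cur ++ [(d.1 + 1, d.2 ++ [fmtSubB c1 (s2.getD (j-1) ' ')])]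
    else if u.1 ≤ l.1 then
      cur ++ [(u.1 + 1, u.2 ++ [fmtRemB c1])]
    else
      cur ++ [(l.1 + 1, l.2 ++ [fmtInsB (s2.getD (j-1) ' ')])]

-- the body of Source B's outer loop: build row i from row i-1
def rowB (s1 s2 : List Char) (prev : List (Int × List String)) (i : Nat) :
    List (Int × List String) :=
  (List.range' 1 s2.length).foldl (stepB s2 (s1.getD (i-1) ' ') prev)
    [((i : Int), (prev.getD 0 (0, [])).2 ++ [fmtRemB (s1.getD (i-1) ' ')])]

def exercicio_6_alt (str1 : String) (str2 : String) : Int × List String :=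
  let s1 := str1.toList
  let s2 := str2.toList
  let m := s1.length
  let n := s2.length
  let last := (List.range' 1 m).foldl (rowB s1 s2) (row0B s2)
  last.getD n (0, [])

-- ===== PRECONDITION & SPEC =====
def Spec_exercicio_6 (str1 : String) (str2 : String) (out : Int × List String) : Prop := out = exercicio_6_alt str1 str2
instance (str1 : String) (str2 : String) (out : Int × List String) : Decidable (Spec_exercicio_6 str1 str2 out) := by unfold Spec_exercicio_6; infer_instance

-- ===== CLAIM (what is proved, stated in full; the proofs are below) =====
def Claim_equal_exercicio_6 : Prop := ∀ (str1 : String) (str2 : String), Dom_exercicio_6 str1 str2 → Spec_exercicio_6 str1 str2 (exercicio_6 str1 str2)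

-- ===== LEMMAS AND PROOFS =====

-- the mathematical recurrence both tables satisfy
def ed (s1 s2 : List Char) : Nat → Nat → Int
  | 0, j => (j : Int)
  | i+1, 0 => (i : Int) + 1
  | i+1, j+1 =>
    if s1.getD i ' ' = s2.getD j ' ' then ed s1 s2 i j
    else 1 + min (ed s1 s2 i (j+1)) (min (ed s1 s2 (i+1) j) (ed s1 s2 i j))
  termination_by i j => (i, j)

theorem ed_i0 (s1 s2 : List Char) (i : Nat) : ed s1 s2 i 0 = (i : Int) := by
  cases i <;> simp [ed]

theorem ed_0j (s1 s2 : List Char) (j : Nat) : ed s1 s2 0 j = (j : Int) := by simp [ed]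

-- the forward-order edit script both programs produce (A backwards then reversed,
-- B forwards cell by cell)
def script (s1 s2 : List Char) : Nat → Nat → List String
  | 0, 0 => []
  | 0, j+1 => script s1 s2 0 j ++ [fmtInsB (s2.getD j ' ')]
  | i+1, 0 => script s1 s2 i 0 ++ [fmtRemB (s1.getD i ' ')]
  | i+1, j+1 =>
    if s1.getD i ' ' = s2.getD j ' ' then script s1 s2 i j
    else if ed s1 s2 i j ≤ ed s1 s2 i (j+1) ∧ ed s1 s2 i j ≤ ed s1 s2 (i+1) j then
      script s1 s2 i j ++ [fmtSubB (s1.getD i ' ') (s2.getD j ' ')]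
    else if ed s1 s2 i (j+1) ≤ ed s1 s2 (i+1) j then
      script s1 s2 i (j+1) ++ [fmtRemB (s1.getD i ' ')]
    else
      script s1 s2 (i+1) j ++ [fmtInsB (s2.getD j ' ')]
  termination_by i j => (i, j)

theorem fmtSub_eq (c1 c2 : Char) : fmtSubA c1 c2 = fmtSubB c1 c2 := rfl
theorem fmtRem_eq (c : Char) : fmtRemA c = fmtRemB c := rfl
theorem fmtIns_eq (c : Char) : fmtInsA c = fmtInsB c := rfl

theorem getD_map_range_lt {α : Type} (f : Nat → α) (k i : Nat) (d : α) (h : i < k) :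
    ((List.range k).map f).getD i d = f i := by
  rw [List.getD_eq_getElem?_getD, List.getElem?_map, List.getElem?_range h]; rfl

-- A's backtracking loop, run on a correct table with enough fuel, appends the reverse
-- of the forward script
theorem backtrack_eq_script (s1 s2 : List Char) (dp : List (List Int)) (m n : Nat)
    (hdp : ∀ i j, i ≤ m → j ≤ n → dpGet dp i j = ed s1 s2 i j) :
    ∀ fuel i j acc, i ≤ m → j ≤ n → i + j ≤ fuel →
      backtrackA s1 s2 dp fuel i j acc = acc ++ (script s1 s2 i j).reverse := by
  intro fuel
  induction fuel with
  | zero =>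
    intro i j acc hi hj hf
    have : i = 0 ∧ j = 0 := by omega
    obtain ⟨rfl, rfl⟩ := this
    simp [backtrackA, script]
  | succ fuel ih =>
    intro i j acc hi hj hf
    match i, j with
    | 0, 0 => simp [backtrackA, script]
    | 0, w+1 =>
      have hd := hdp 0 (w+1) (by omega) hj
      have hd' := hdp 0 w (by omega) (by omega)
      have hC4 : ed s1 s2 0 (w+1) = ed s1 s2 0 w + 1 := by
        simp only [ed]; push_cast; ring
      simp only [backtrackA, Nat.add_sub_cancel, hd, hd']
      rw [if_pos (by omega : (0:Nat) > 0 ∨ w+1 > 0),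
        if_neg (fun h => Nat.lt_irrefl 0 h.1),
        if_neg (fun h => Nat.lt_irrefl 0 h.1),
        if_neg (fun h => Nat.lt_irrefl 0 h.1),
        if_pos ⟨by omega, hC4⟩]
      rw [ih 0 w _ (by omega) (by omega) (by omega)]
      simp [script, fmtIns_eq]
    | v+1, 0 =>
      have hd := hdp (v+1) 0 hi (by omega)
      have hd' := hdp v 0 (by omega) (by omega)
      have hC3 : ed s1 s2 (v+1) 0 = ed s1 s2 v 0 + 1 := by
        rw [ed_i0, ed_i0]; push_cast; ring
      simp only [backtrackA, Nat.add_sub_cancel, hd, hd']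
      rw [if_pos (by omega : v+1 > 0 ∨ (0:Nat) > 0),
        if_neg (fun h => Nat.lt_irrefl 0 h.2.1),
        if_neg (fun h => Nat.lt_irrefl 0 h.2.1),
        if_pos ⟨by omega, hC3⟩]
      rw [ih v 0 _ (by omega) (by omega) (by omega)]
      simp [script, fmtRem_eq]
    | v+1, w+1 =>
      have hd := hdp (v+1) (w+1) hi hj
      have hdu := hdp v (w+1) (by omega) hj
      have hdl := hdp (v+1) w hi (by omega)
      have hdd := hdp v w (by omega) (by omega)
      by_cases hc : s1.getD v ' ' = s2.getD w ' '
      · simp only [backtrackA, Nat.add_sub_cancel]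
        rw [if_pos (by omega : v+1 > 0 ∨ w+1 > 0), if_pos ⟨by omega, by omega, hc⟩]
        rw [ih v w _ (by omega) (by omega) (by omega)]
        rw [show script s1 s2 (v+1) (w+1) = script s1 s2 v w by rw [script, if_pos hc]]
      · have heq : ed s1 s2 (v+1) (w+1)
            = 1 + min (ed s1 s2 v (w+1)) (min (ed s1 s2 (v+1) w) (ed s1 s2 v w)) := by
          rw [ed, if_neg hc]
        by_cases hS : ed s1 s2 v w ≤ ed s1 s2 v (w+1) ∧ ed s1 s2 v w ≤ ed s1 s2 (v+1) w
        · have hC2 : ed s1 s2 (v+1) (w+1) = ed s1 s2 v w + 1 := by rw [heq]; omega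
          simp only [backtrackA, Nat.add_sub_cancel, hd, hdd]
          rw [if_pos (by omega : v+1 > 0 ∨ w+1 > 0),
            if_neg (fun h => hc h.2.2),
            if_pos ⟨by omega, by omega, hC2⟩]
          rw [ih v w _ (by omega) (by omega) (by omega)]
          rw [show script s1 s2 (v+1) (w+1)
              = script s1 s2 v w ++ [fmtSubB (s1.getD v ' ') (s2.getD w ' ')] by
            rw [script, if_neg hc, if_pos hS]]
          simp [fmtSub_eq]
        · by_cases hR : ed s1 s2 v (w+1) ≤ ed s1 s2 (v+1) w
          · have hC2 : ¬(ed s1 s2 (v+1) (w+1) = ed s1 s2 v w + 1) := by rw [heq]; omega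
            have hC3 : ed s1 s2 (v+1) (w+1) = ed s1 s2 v (w+1) + 1 := by rw [heq]; omega
            simp only [backtrackA, Nat.add_sub_cancel, hd, hdd, hdu]
            rw [if_pos (by omega : v+1 > 0 ∨ w+1 > 0),
              if_neg (fun h => hc h.2.2),
              if_neg (fun h => hC2 h.2.2),
              if_pos ⟨by omega, hC3⟩]
            rw [ih v (w+1) _ (by omega) hj (by omega)]
            rw [show script s1 s2 (v+1) (w+1)
                = script s1 s2 v (w+1) ++ [fmtRemB (s1.getD v ' ')] by
              rw [script, if_neg hc, if_neg hS, if_pos hR]]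
            simp [fmtRem_eq]
          · have hC2 : ¬(ed s1 s2 (v+1) (w+1) = ed s1 s2 v w + 1) := by rw [heq]; omega
            have hC3 : ¬(ed s1 s2 (v+1) (w+1) = ed s1 s2 v (w+1) + 1) := by rw [heq]; omega
            have hC4 : ed s1 s2 (v+1) (w+1) = ed s1 s2 (v+1) w + 1 := by rw [heq]; omega
            simp only [backtrackA, Nat.add_sub_cancel, hd, hdd, hdu, hdl]
            rw [if_pos (by omega : v+1 > 0 ∨ w+1 > 0),
              if_neg (fun h => hc h.2.2),
              if_neg (fun h => hC2 h.2.2),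
              if_neg (fun h => hC3 h.2),
              if_pos ⟨by omega, hC4⟩]
            rw [ih (v+1) w _ hi (by omega) (by omega)]
            rw [show script s1 s2 (v+1) (w+1)
                = script s1 s2 (v+1) w ++ [fmtInsB (s2.getD w ' ')] by
              rw [script, if_neg hc, if_neg hS, if_neg hR]]
            simp [fmtIns_eq]

def wfDP (m n : Nat) (dp : List (List Int)) : Prop :=
  dp.length = m + 1 ∧ ∀ r ∈ dp, r.length = n + 1

theorem rowAt_set_self (dp : List (List Int)) (i : Nat) (r : List Int)
    (hi : i < dp.length) : (dp.set i r).getD i [] = r := by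
  rw [List.getD_eq_getElem?_getD, List.getElem?_set, if_pos rfl, if_pos hi]
  rfl

theorem rowAt_set_ne (dp : List (List Int)) (i i' : Nat) (r : List Int)
    (h : i ≠ i') : (dp.set i r).getD i' [] = dp.getD i' [] := by
  rw [List.getD_eq_getElem?_getD, List.getElem?_set, if_neg h, ← List.getD_eq_getElem?_getD]

theorem dpGet_set_self (dp : List (List Int)) (i j : Nat) (v : Int)
    (hi : i < dp.length) (hj : j < (dp.getD i []).length) :
    dpGet (dpSet dp i j v) i j = v := by
  unfold dpGet dpSet
  rw [rowAt_set_self dp i _ hi]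
  rw [List.getD_eq_getElem?_getD, List.getElem?_set, if_pos rfl, if_pos hj]
  rfl

theorem dpGet_set_ne (dp : List (List Int)) (i j i' j' : Nat) (v : Int)
    (h : i' ≠ i ∨ j' ≠ j) :
    dpGet (dpSet dp i j v) i' j' = dpGet dp i' j' := by
  unfold dpGet dpSet
  by_cases hii : i = i'
  · subst hii
    have hjj : j' ≠ j := by tauto
    by_cases hlen : i < dp.length
    · rw [rowAt_set_self dp i _ hlen]
      rw [List.getD_eq_getElem?_getD, List.getElem?_set, if_neg (fun hh => hjj hh.symm),
        ← List.getD_eq_getElem?_getD]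
    · rw [List.set_eq_of_length_le (by omega)]
  · rw [rowAt_set_ne dp i i' _ hii]

theorem wf_row_len {m n : Nat} {dp : List (List Int)} (hw : wfDP m n dp)
    (i : Nat) (hi : i ≤ m) : (dp.getD i []).length = n + 1 := by
  have hlt : i < dp.length := by rw [hw.1]; omega
  rw [List.getD_eq_getElem _ _ hlt]
  exact hw.2 _ (List.getElem_mem hlt)

theorem wf_dpSet {m n : Nat} {dp : List (List Int)} (hw : wfDP m n dp)
    (i j : Nat) (v : Int) (hi : i ≤ m) : wfDP m n (dpSet dp i j v) := by
  obtain ⟨hl, hr⟩ := hw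
  refine ⟨by simp [dpSet, hl], ?_⟩
  intro r hrm
  rcases List.mem_or_eq_of_mem_set hrm with hmem | heq
  · exact hr r hmem
  · subst heq
    rw [List.length_set]
    have hlt : i < dp.length := by rw [hl]; omega
    rw [List.getD_eq_getElem dp _ hlt]
    exact hr _ (List.getElem_mem hlt)

theorem dp0_spec (m n : Nat) :
    wfDP m n ((List.range (m+1)).map (fun _ => (List.range (n+1)).map (fun _ => (0 : Int)))) ∧
    ∀ i j, dpGet ((List.range (m+1)).map (fun _ => (List.range (n+1)).map (fun _ => (0 : Int)))) i j = 0 := by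
  constructor
  · refine ⟨by simp, ?_⟩
    intro r hrm
    rcases List.mem_map.1 hrm with ⟨a, _, rfl⟩
    simp
  · intro i j
    unfold dpGet
    by_cases hi : i < m + 1
    · rw [getD_map_range_lt _ _ i [] hi]
      by_cases hj : j < n + 1
      · rw [getD_map_range_lt _ _ j 0 hj]
      · rw [List.getD_eq_default _ _ (by rw [List.length_map, List.length_range]; omega)]
    · rw [List.getD_eq_default ((List.range (m+1)).map
          (fun _ => (List.range (n+1)).map (fun _ => (0 : Int)))) []
          (by rw [List.length_map, List.length_range]; omega)]
      simp

theorem dp1_spec (m n : Nat) :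
    ∀ k, k ≤ m + 1 →
      wfDP m n ((List.range k).foldl (fun dp i => dpSet dp i 0 (i : Int))
        ((List.range (m+1)).map (fun _ => (List.range (n+1)).map (fun _ => (0 : Int))))) ∧
      ∀ i j, dpGet ((List.range k).foldl (fun dp i => dpSet dp i 0 (i : Int))
        ((List.range (m+1)).map (fun _ => (List.range (n+1)).map (fun _ => (0 : Int))))) i j
        = if i < k ∧ j = 0 then (i : Int) else 0 := by
  intro k
  induction k with
  | zero =>
    intro _
    obtain ⟨hw, hv⟩ := dp0_spec m n
    refine ⟨hw, ?_⟩
    intro i j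
    simp only [List.range_zero, List.foldl_nil]
    rw [hv i j]
    simp
  | succ k ihk =>
    intro hk
    obtain ⟨hw, hv⟩ := ihk (by omega)
    rw [List.range_succ (n := k), List.foldl_append]
    simp only [List.foldl_cons, List.foldl_nil]
    refine ⟨wf_dpSet hw k 0 _ (by omega), ?_⟩
    intro i j
    by_cases hij : i = k ∧ j = 0
    · obtain ⟨rfl, rfl⟩ := hij
      rw [dpGet_set_self _ _ _ _ (by rw [hw.1]; omega) (by rw [wf_row_len hw i (by omega)]; omega)]
      simp
    · rw [dpGet_set_ne _ _ _ _ _ _ (not_and_or.mp hij), hv i j]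
      by_cases h1 : i < k ∧ j = 0
      · rw [if_pos h1, if_pos ⟨by omega, h1.2⟩]
      · rw [if_neg h1, if_neg (by omega)]

theorem dp2_spec (m n : Nat) :
    ∀ k, k ≤ n + 1 →
      wfDP m n ((List.range k).foldl (fun dp j => dpSet dp 0 j (j : Int))
        ((List.range (m+1)).foldl (fun dp i => dpSet dp i 0 (i : Int))
          ((List.range (m+1)).map (fun _ => (List.range (n+1)).map (fun _ => (0 : Int)))))) ∧
      ∀ i j, dpGet ((List.range k).foldl (fun dp j => dpSet dp 0 j (j : Int))
        ((List.range (m+1)).foldl (fun dp i => dpSet dp i 0 (i : Int))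
          ((List.range (m+1)).map (fun _ => (List.range (n+1)).map (fun _ => (0 : Int)))))) i j
        = if i = 0 ∧ j < k then (j : Int) else if i ≤ m ∧ j = 0 then (i : Int) else 0 := by
  intro k
  induction k with
  | zero =>
    intro _
    obtain ⟨hw, hv⟩ := dp1_spec m n (m+1) le_rfl
    refine ⟨hw, ?_⟩
    intro i j
    simp only [List.range_zero, List.foldl_nil]
    rw [hv i j]
    by_cases h1 : i < m + 1 ∧ j = 0
    · rw [if_pos h1, if_neg (by omega), if_pos ⟨by omega, h1.2⟩]
    · rw [if_neg h1, if_neg (by omega), if_neg (by omega)]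
  | succ k ihk =>
    intro hk
    obtain ⟨hw, hv⟩ := ihk (by omega)
    rw [List.range_succ (n := k), List.foldl_append]
    simp only [List.foldl_cons, List.foldl_nil]
    refine ⟨wf_dpSet hw 0 k _ (by omega), ?_⟩
    intro i j
    by_cases hij : i = 0 ∧ j = k
    · obtain ⟨rfl, rfl⟩ := hij
      rw [dpGet_set_self _ _ _ _ (by rw [hw.1]; omega) (by rw [wf_row_len hw 0 (by omega)]; omega)]
      simp
    · rw [dpGet_set_ne _ _ _ _ _ _ (not_and_or.mp hij), hv i j]
      by_cases h1 : i = 0 ∧ j < k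
      · rw [if_pos h1, if_pos ⟨h1.1, by omega⟩]
      · rw [if_neg h1]
        by_cases h2 : i = 0 ∧ j < k + 1
        · have hj : j = k := by omega
          exact absurd ⟨h2.1, hj⟩ hij
        · rw [if_neg h2]

theorem rowA_app (s1 s2 : List Char) (dp : List (List Int)) (i : Nat) :
    rowA s1 s2 dp i = (List.range' 1 s2.length).foldl (innerA s1 s2 i) dp := rfl

theorem innerA_app (s1 s2 : List Char) (i : Nat) (dp : List (List Int)) (j : Nat) :
    innerA s1 s2 i dp j =
      if s1.getD (i-1) ' ' = s2.getD (j-1) ' ' then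
        dpSet dp i j (dpGet dp (i-1) (j-1))
      else
        dpSet dp i j
          (1 + min (dpGet dp (i-1) j) (min (dpGet dp i (j-1)) (dpGet dp (i-1) (j-1)))) := rfl

theorem innerA_spec (s1 s2 : List Char) (k : Nat) (hk : k < s1.length) :
    ∀ l, l ≤ s2.length → ∀ dp, wfDP s1.length s2.length dp →
      (∀ i j, i ≤ s1.length → j ≤ s2.length → dpGet dp i j =
        if i ≤ k then ed s1 s2 i j else if j = 0 then (i : Int) else 0) →
      wfDP s1.length s2.length ((List.range' 1 l).foldl (innerA s1 s2 (k+1)) dp) ∧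
      (∀ i j, i ≤ s1.length → j ≤ s2.length →
        dpGet ((List.range' 1 l).foldl (innerA s1 s2 (k+1)) dp) i j =
          if i ≤ k then ed s1 s2 i j
          else if i = k+1 ∧ j ≤ l then ed s1 s2 i j
          else if j = 0 then (i : Int) else 0) := by
  intro l
  induction l with
  | zero =>
    intro _ dp hw hv
    refine ⟨hw, ?_⟩
    intro i j hi hj
    simp only [List.range'_zero, List.foldl_nil]
    rw [hv i j hi hj]
    by_cases h1 : i ≤ k
    · rw [if_pos h1, if_pos h1]
    · rw [if_neg h1, if_neg h1]
      by_cases h2 : i = k+1 ∧ j ≤ 0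
      · have hj0 : j = 0 := by omega
        subst hj0
        rw [if_pos rfl, if_pos h2, h2.1, ed_i0]
      · rw [if_neg h2]
  | succ l ihl =>
    intro hl dp hw hv
    obtain ⟨hwl, hvl⟩ := ihl (by omega) dp hw hv
    rw [List.range'_concat, List.foldl_append]
    simp only [List.foldl_cons, List.foldl_nil, Nat.one_mul]
    rw [show 1 + l = l + 1 from Nat.add_comm 1 l]
    have hread1 : dpGet ((List.range' 1 l).foldl (innerA s1 s2 (k+1)) dp) k (l+1)
        = ed s1 s2 k (l+1) := by
      rw [hvl k (l+1) (by omega) (by omega), if_pos le_rfl]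
    have hread2 : dpGet ((List.range' 1 l).foldl (innerA s1 s2 (k+1)) dp) (k+1) l
        = ed s1 s2 (k+1) l := by
      by_cases h1 : k + 1 ≤ k
      · omega
      · rw [hvl (k+1) l (by omega) (by omega), if_neg h1, if_pos ⟨rfl, le_rfl⟩]
    have hread3 : dpGet ((List.range' 1 l).foldl (innerA s1 s2 (k+1)) dp) k l
        = ed s1 s2 k l := by
      rw [hvl k l (by omega) (by omega), if_pos le_rfl]
    have hrowlen : ∀ i, i ≤ s1.length →
        (((List.range' 1 l).foldl (innerA s1 s2 (k+1)) dp).getD i []).length = s2.length + 1 :=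
      fun i hi => wf_row_len hwl i hi
    have hnew : dpGet (innerA s1 s2 (k+1) ((List.range' 1 l).foldl (innerA s1 s2 (k+1)) dp) (l+1))
        (k+1) (l+1) = ed s1 s2 (k+1) (l+1) := by
      rw [innerA_app]
      simp only [Nat.add_sub_cancel, hread1, hread2, hread3]
      by_cases hc : s1.getD k ' ' = s2.getD l ' '
      · rw [if_pos hc, dpGet_set_self _ _ _ _ (by rw [hwl.1]; omega)
            (by rw [hrowlen (k+1) (by omega)]; omega), ed, if_pos hc]
      · rw [if_neg hc, dpGet_set_self _ _ _ _ (by rw [hwl.1]; omega)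
            (by rw [hrowlen (k+1) (by omega)]; omega), ed, if_neg hc]
    have hold : ∀ i j, i ≤ s1.length → j ≤ s2.length → ¬(i = k+1 ∧ j = l+1) →
        dpGet (innerA s1 s2 (k+1) ((List.range' 1 l).foldl (innerA s1 s2 (k+1)) dp) (l+1)) i j
          = dpGet ((List.range' 1 l).foldl (innerA s1 s2 (k+1)) dp) i j := by
      intro i j hi hj hne
      rw [innerA_app]
      simp only [Nat.add_sub_cancel]
      by_cases hc : s1.getD k ' ' = s2.getD l ' '
      · rw [if_pos hc, dpGet_set_ne _ _ _ _ _ _ (not_and_or.mp hne)]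
      · rw [if_neg hc, dpGet_set_ne _ _ _ _ _ _ (not_and_or.mp hne)]
    have hwf2 : wfDP s1.length s2.length
        (innerA s1 s2 (k+1) ((List.range' 1 l).foldl (innerA s1 s2 (k+1)) dp) (l+1)) := by
      rw [innerA_app]
      simp only [Nat.add_sub_cancel]
      by_cases hc : s1.getD k ' ' = s2.getD l ' '
      · rw [if_pos hc]; exact wf_dpSet hwl _ _ _ (by omega)
      · rw [if_neg hc]; exact wf_dpSet hwl _ _ _ (by omega)
    refine ⟨hwf2, ?_⟩
    intro i j hi hj
    by_cases hij : i = k+1 ∧ j = l+1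
    · obtain ⟨rfl, rfl⟩ := hij
      rw [hnew, if_neg (by omega), if_pos ⟨rfl, le_rfl⟩]
    · rw [hold i j hi hj hij, hvl i j hi hj]
      by_cases h1 : i ≤ k
      · rw [if_pos h1, if_pos h1]
      · rw [if_neg h1, if_neg h1]
        by_cases h2 : i = k+1 ∧ j ≤ l
        · rw [if_pos h2, if_pos ⟨h2.1, by omega⟩]
        · rw [if_neg h2, if_neg (show ¬(i = k+1 ∧ j ≤ l+1) by omega)]

theorem dpA_partial (s1 s2 : List Char) :
    ∀ k, k ≤ s1.length →
      wfDP s1.length s2.length ((List.range' 1 k).foldl (rowA s1 s2)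
        ((List.range (s2.length+1)).foldl (fun dp j => dpSet dp 0 j (j : Int))
          ((List.range (s1.length+1)).foldl (fun dp i => dpSet dp i 0 (i : Int))
            ((List.range (s1.length+1)).map (fun _ => (List.range (s2.length+1)).map (fun _ => (0 : Int))))))) ∧
      ∀ i j, i ≤ s1.length → j ≤ s2.length →
        dpGet ((List.range' 1 k).foldl (rowA s1 s2)
          ((List.range (s2.length+1)).foldl (fun dp j => dpSet dp 0 j (j : Int))
            ((List.range (s1.length+1)).foldl (fun dp i => dpSet dp i 0 (i : Int))
              ((List.range (s1.length+1)).map (fun _ => (List.range (s2.length+1)).map (fun _ => (0 : Int))))))) i j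
          = if i ≤ k then ed s1 s2 i j else if j = 0 then (i : Int) else 0 := by
  intro k
  induction k with
  | zero =>
    intro _
    obtain ⟨hw, hv⟩ := dp2_spec s1.length s2.length (s2.length+1) le_rfl
    refine ⟨hw, ?_⟩
    intro i j hi hj
    simp only [List.range'_zero, List.foldl_nil]
    rw [hv i j]
    by_cases h1 : i = 0
    · subst h1
      rw [if_pos (show (0:Nat) = 0 ∧ j < s2.length + 1 from ⟨rfl, by omega⟩),
        if_pos (show (0:Nat) ≤ 0 from le_rfl), ed_0j]
    · rw [if_neg (show ¬(i = 0 ∧ j < s2.length + 1) from fun h => h1 h.1),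
        if_neg (show ¬(i ≤ 0) by omega)]
      by_cases h2 : j = 0
      · rw [if_pos (show i ≤ s1.length ∧ j = 0 from ⟨hi, h2⟩), if_pos h2]
      · rw [if_neg (show ¬(i ≤ s1.length ∧ j = 0) from fun h => h2 h.2), if_neg h2]
  | succ k ihk =>
    intro hk
    obtain ⟨hw, hv⟩ := ihk (by omega)
    rw [List.range'_concat, List.foldl_append]
    simp only [List.foldl_cons, List.foldl_nil, Nat.one_mul]
    rw [show 1 + k = k + 1 from Nat.add_comm 1 k]
    have := innerA_spec s1 s2 k (by omega) s2.length le_rfl _ hw hv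
    obtain ⟨hw2, hv2⟩ := this
    rw [rowA_app]
    refine ⟨hw2, ?_⟩
    intro i j hi hj
    rw [hv2 i j hi hj]
    by_cases h1 : i ≤ k
    · rw [if_pos h1, if_pos (show i ≤ k + 1 by omega)]
    · rw [if_neg h1]
      by_cases h2 : i = k+1
      · rw [if_pos (show i = k + 1 ∧ j ≤ s2.length from ⟨h2, hj⟩),
          if_pos (show i ≤ k + 1 by omega)]
      · rw [if_neg (show ¬(i = k + 1 ∧ j ≤ s2.length) from fun h => h2 h.1),
          if_neg (show ¬(i ≤ k + 1) by omega)]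

theorem dpA_eq_ed (s1 s2 : List Char) :
    ∀ i j, i ≤ s1.length → j ≤ s2.length →
      dpGet ((List.range' 1 s1.length).foldl (rowA s1 s2)
        ((List.range (s2.length+1)).foldl (fun dp j => dpSet dp 0 j (j : Int))
          ((List.range (s1.length+1)).foldl (fun dp i => dpSet dp i 0 (i : Int))
            ((List.range (s1.length+1)).map (fun _ => (List.range (s2.length+1)).map (fun _ => (0 : Int))))))) i j
        = ed s1 s2 i j := by
  intro i j hi hj
  obtain ⟨_, hv⟩ := dpA_partial s1 s2 s1.length le_rfl
  rw [hv i j hi hj, if_pos hi]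

-- B-side: row 0 is cell-by-cell (ed 0 j, script 0 j)
theorem row0B_spec (s1 s2 : List Char) :
    ∀ l, l ≤ s2.length →
      (List.range' 1 l).foldl
        (fun r (j : Nat) => r ++ [((j : Int), (r.getD (j-1) (0, [])).2 ++ [fmtInsB (s2.getD (j-1) ' ')])])
        [((0:Int), ([] : List String))]
      = (List.range (l+1)).map (fun j => (ed s1 s2 0 j, script s1 s2 0 j)) := by
  intro l
  induction l with
  | zero =>
    intro _
    rw [show List.range' 1 0 = [] from rfl, show List.range 1 = [0] from rfl]
    simp [ed_0j, script]
  | succ l ihl =>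
    intro hl
    rw [List.range'_concat, List.foldl_append, ihl (by omega)]
    simp only [List.foldl_cons, List.foldl_nil, Nat.one_mul]
    rw [show 1 + l = l + 1 from Nat.add_comm 1 l]
    simp only [Nat.add_sub_cancel,
      getD_map_range_lt (fun j => (ed s1 s2 0 j, script s1 s2 0 j)) (l+1) l (0, []) (by omega)]
    rw [List.range_succ (n := l+1), List.map_append]
    simp [ed_0j, script]

-- B-side: each new row is cell-by-cell (ed (k+1) j, script (k+1) j)
theorem rowB_inner (s1 s2 : List Char) (k : Nat) (prev : List (Int × List String))
    (hprev : prev = (List.range (s2.length+1)).map (fun j => (ed s1 s2 k j, script s1 s2 k j))) :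
    ∀ l, l ≤ s2.length →
      (List.range' 1 l).foldl (stepB s2 (s1.getD k ' ') prev)
        [(((k+1 : Nat) : Int), (prev.getD 0 (0, [])).2 ++ [fmtRemB (s1.getD k ' ')])]
      = (List.range (l+1)).map (fun j => (ed s1 s2 (k+1) j, script s1 s2 (k+1) j)) := by
  intro l
  induction l with
  | zero =>
    intro _
    rw [show List.range' 1 0 = [] from rfl, show List.range 1 = [0] from rfl]
    simp only [List.foldl_nil, List.map_cons, List.map_nil, hprev,
      getD_map_range_lt (fun j => (ed s1 s2 k j, script s1 s2 k j)) (s2.length+1) 0 (0, []) (by omega)]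
    rw [show script s1 s2 (k+1) 0 = script s1 s2 k 0 ++ [fmtRemB (s1.getD k ' ')] from by rw [script]]
    rw [ed_i0]
  | succ l ihl =>
    intro hl
    rw [List.range'_concat, List.foldl_append, ihl (by omega)]
    simp only [List.foldl_cons, List.foldl_nil, Nat.one_mul]
    rw [show 1 + l = l + 1 from Nat.add_comm 1 l]
    simp only [stepB, Nat.add_sub_cancel, hprev,
      getD_map_range_lt (fun j => (ed s1 s2 k j, script s1 s2 k j)) (s2.length+1) l (0, []) (by omega),
      getD_map_range_lt (fun j => (ed s1 s2 k j, script s1 s2 k j)) (s2.length+1) (l+1) (0, []) (by omega),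
      getD_map_range_lt (fun j => (ed s1 s2 (k+1) j, script s1 s2 (k+1) j)) (l+1) l (0, []) (by omega)]
    rw [List.range_succ (n := l+1), List.map_append]
    by_cases hc : s1.getD k ' ' = s2.getD l ' '
    · rw [if_pos hc]
      have hv : ed s1 s2 (k+1) (l+1) = ed s1 s2 k l := by rw [ed, if_pos hc]
      have hs : script s1 s2 (k+1) (l+1) = script s1 s2 k l := by rw [script, if_pos hc]
      simp [hv, hs]
    · rw [if_neg hc]
      have hrec : ed s1 s2 (k+1) (l+1)
          = 1 + min (ed s1 s2 k (l+1)) (min (ed s1 s2 (k+1) l) (ed s1 s2 k l)) := by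
        rw [ed, if_neg hc]
      by_cases hS : ed s1 s2 k l ≤ ed s1 s2 k (l+1) ∧ ed s1 s2 k l ≤ ed s1 s2 (k+1) l
      · rw [if_pos hS]
        have hv : ed s1 s2 (k+1) (l+1) = ed s1 s2 k l + 1 := by rw [hrec]; omega
        have hs : script s1 s2 (k+1) (l+1)
            = script s1 s2 k l ++ [fmtSubB (s1.getD k ' ') (s2.getD l ' ')] := by
          rw [script, if_neg hc, if_pos hS]
        simp [hv, hs]
      · rw [if_neg hS]
        by_cases hR : ed s1 s2 k (l+1) ≤ ed s1 s2 (k+1) l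
        · rw [if_pos hR]
          have hv : ed s1 s2 (k+1) (l+1) = ed s1 s2 k (l+1) + 1 := by rw [hrec]; omega
          have hs : script s1 s2 (k+1) (l+1)
              = script s1 s2 k (l+1) ++ [fmtRemB (s1.getD k ' ')] := by
            rw [script, if_neg hc, if_neg hS, if_pos hR]
          simp [hv, hs]
        · rw [if_neg hR]
          have hv : ed s1 s2 (k+1) (l+1) = ed s1 s2 (k+1) l + 1 := by rw [hrec]; omega
          have hs : script s1 s2 (k+1) (l+1)
              = script s1 s2 (k+1) l ++ [fmtInsB (s2.getD l ' ')] := by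
            rw [script, if_neg hc, if_neg hS, if_neg hR]
          simp [hv, hs]

-- B-side: folding rowB over the first k rows yields row k
theorem rowsB_spec (s1 s2 : List Char) :
    ∀ k, k ≤ s1.length →
      (List.range' 1 k).foldl (rowB s1 s2) (row0B s2)
        = (List.range (s2.length+1)).map (fun j => (ed s1 s2 k j, script s1 s2 k j)) := by
  intro k
  induction k with
  | zero =>
    intro _
    rw [show List.range' 1 0 = [] from rfl]
    simp only [List.foldl_nil, row0B]
    exact row0B_spec s1 s2 s2.length le_rfl
  | succ k ihk =>
    intro hk
    rw [List.range'_concat, List.foldl_append, ihk (by omega)]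
    simp only [List.foldl_cons, List.foldl_nil, Nat.one_mul]
    rw [show 1 + k = k + 1 from Nat.add_comm 1 k]
    simp only [rowB, Nat.add_sub_cancel]
    exact rowB_inner s1 s2 k _ rfl s2.length le_rfl

-- ===== VERDICT (by name: the statement is the Claim_ definition above) =====
theorem exercicio_6_spec : Claim_equal_exercicio_6 := by
  intro str1 str2 _
  unfold Spec_exercicio_6 exercicio_6 exercicio_6_alt
  dsimp only
  set s1 := str1.toList
  set s2 := str2.toList
  rw [rowsB_spec s1 s2 s1.length le_rfl,
    getD_map_range_lt (fun j => (ed s1 s2 s1.length j, script s1 s2 s1.length j)) _ s2.length (0, []) (by omega)]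
  refine Prod.ext ?_ ?_
  · simp only
    exact dpA_eq_ed s1 s2 s1.length s2.length le_rfl le_rfl
  · simp only
    rw [backtrack_eq_script s1 s2 _ s1.length s2.length (dpA_eq_ed s1 s2)
      (s1.length + s2.length) s1.length s2.length [] le_rfl le_rfl le_rfl]
    simp
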